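-- pv_equiv track=rewrite | github.com/Yuuoniy/SpecAuditor | artifact/reproduced_bug_detection/run.py | build_localized_bug_detection_summary
-- ===== SOURCE A (Python) =====
-- def normalize_bool(value) -> bool:
--     return str(value).strip().lower() in {"true", "1", "yes"}
--
-- def benchmark_row_key(row_dict: dict) -> tuple[str, str, str]:
--     return (
--         str(row_dict.get("seed patch", "")).strip(),
--         str(row_dict.get("detected target", "")).strip(),
--         str(row_dict.get("buggy function", "")).strip(),
--     )
--
-- def build_localized_bug_detection_summary(result_rows: list[dict], generation_seed_count: int | None = None) -> dict:
--     benchmark_rows: dict[tuple[str, str, str], dict] = {}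
--
--     for row in result_rows:
--         key = benchmark_row_key(row)
--         summary_row = benchmark_rows.setdefault(
--             key,
--             {
--                 "seed patch": str(row.get("seed patch", "")).strip(),
--                 "expected_function_found": bool(row.get("expected_function_found", False)),
--                 "expected_function_in_default_budget": bool(row.get("expected_function_in_default_budget", False)),
--                 "expected_function_forced_into_audit_set": bool(row.get("expected_function_forced_into_audit_set", False)),
--                 "expected_bug_detected": False,
--             },
--         )
--         if bool(row.get("is_expected_buggy_function", False)) and normalize_bool(row.get("has_violation", False)):
--             summary_row["expected_bug_detected"] = True
--
--     seed_patches = {value["seed patch"] for value in benchmark_rows.values()}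
--     summary = {
--         "localized_expected_function_found_rows": sum(
--             1 for value in benchmark_rows.values() if value["expected_function_found"]
--         ),
--         "localized_expected_function_missed_rows": sum(
--             1 for value in benchmark_rows.values() if not value["expected_function_found"]
--         ),
--         "detected_bug_rows": sum(1 for value in benchmark_rows.values() if value["expected_bug_detected"]),
--         "seed_patch_count": len(seed_patches),
--     }
--     if generation_seed_count is not None:
--         summary["generation_seed_count"] = generation_seed_count
--     return summary
-- ===== SOURCE B (Python) =====
-- def normalize_bool(value) -> bool:
--     return str(value).strip().lower() in {"true", "1", "yes"}
--
-- def benchmark_row_key(row_dict):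
--     return (
--         str(row_dict.get("seed patch", "")).strip(),
--         str(row_dict.get("detected target", "")).strip(),
--         str(row_dict.get("buggy function", "")).strip(),
--     )
--
-- def build_localized_bug_detection_summary(result_rows, generation_seed_count=None):
--     # single pass: dedup map key -> [found, bug_counted], seed-patch set, running counters
--     info = {}
--     seeds = set()
--     found = 0
--     detected = 0
--     for row in result_rows:
--         key = benchmark_row_key(row)
--         entry = info.get(key)
--         if entry is None:
--             entry = [bool(row.get("expected_function_found", False)), False]
--             info[key] = entry
--             if entry[0]:
--                 found += 1
--             seeds.add(str(row.get("seed patch", "")).strip())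
--         if (bool(row.get("is_expected_buggy_function", False))
--                 and normalize_bool(row.get("has_violation", False))
--                 and not entry[1]):
--             entry[1] = True
--             detected += 1
--     summary = {
--         "localized_expected_function_found_rows": found,
--         "localized_expected_function_missed_rows": len(info) - found,
--         "detected_bug_rows": detected,
--         "seed_patch_count": len(seeds),
--     }
--     if generation_seed_count is not None:
--         summary["generation_seed_count"] = generation_seed_count
--     return summary
-- ===== Notes on version B (the rewrite author's own statement) =====
-- stated objective: alternative
-- what changed: B replaces A's build-the-dedup-dict-then-run-four-separate-counting-passes structure with a single pass over result_rows that maintains running found/detected counters, a seed-patch set and a minimal per-key (found, bug_counted) record, computing missed as len(dict)-found at the end.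
import Mathlib
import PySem

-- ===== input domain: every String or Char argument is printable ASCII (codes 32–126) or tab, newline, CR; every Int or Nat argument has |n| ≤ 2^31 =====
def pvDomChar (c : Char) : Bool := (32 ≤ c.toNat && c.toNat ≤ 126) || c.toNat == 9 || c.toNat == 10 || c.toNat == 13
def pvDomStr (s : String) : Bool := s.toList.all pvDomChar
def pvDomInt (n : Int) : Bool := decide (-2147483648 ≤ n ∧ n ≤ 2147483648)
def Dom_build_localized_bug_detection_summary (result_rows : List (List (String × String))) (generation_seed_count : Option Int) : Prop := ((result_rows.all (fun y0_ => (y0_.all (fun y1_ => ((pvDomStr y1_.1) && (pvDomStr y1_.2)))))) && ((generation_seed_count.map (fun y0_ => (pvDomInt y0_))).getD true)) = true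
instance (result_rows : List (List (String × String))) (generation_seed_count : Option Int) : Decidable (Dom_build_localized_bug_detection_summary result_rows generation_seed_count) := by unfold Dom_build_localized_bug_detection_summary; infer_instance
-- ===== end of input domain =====

-- B fuses A's dict-building pass and its four separate counting passes into one pass that
-- maintains running counters and a seed-patch set (alternative decomposition; same asymptotic cost).


-- ===== PORT A =====
-- shared helpers of the module (both Pythons use the identical definitions)
-- normalize_bool(s) for a string s: str(s).strip().lower() in {"true", "1", "yes"}
def pvNormalizeBool (s : String) : Bool :=
  let t := PySem.Str.lower (PySem.Str.strip s)
  t == "true" || t == "1" || t == "yes"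

-- benchmark_row_key(row): str() on the looked-up string is the identity; missing key -> "" default
def pvRowKey (row : List (String × String)) : String × String × String :=
  (PySem.Str.strip ((PySem.Dict.mk row).getD "seed patch" ""),
   PySem.Str.strip ((PySem.Dict.mk row).getD "detected target" ""),
   PySem.Str.strip ((PySem.Dict.mk row).getD "buggy function" ""))

-- bool(row.get(k, False)): a present string is truthy iff non-empty; missing -> False
def pvRowBool (row : List (String × String)) (k : String) : Bool :=
  match (PySem.Dict.mk row).get? k with
  | some s => s != ""
  | none => false

-- normalize_bool(row.get(k, False)): str(False)="False" -> "false", not in the set -> False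
def pvRowNB (row : List (String × String)) (k : String) : Bool :=
  match (PySem.Dict.mk row).get? k with
  | some s => pvNormalizeBool s
  | none => false

-- summary_row value: ("seed patch", expected_function_found, in_default_budget, forced, expected_bug_detected)
-- A's loop body
def pvAStep (d : PySem.Dict (String × String × String) (String × Bool × Bool × Bool × Bool))
    (row : List (String × String)) : PySem.Dict (String × String × String) (String × Bool × Bool × Bool × Bool) :=
  let key := pvRowKey row
  let d1 := d.setdefault key
      (PySem.Str.strip ((PySem.Dict.mk row).getD "seed patch" ""),
       pvRowBool row "expected_function_found",
       pvRowBool row "expected_function_in_default_budget",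
       pvRowBool row "expected_function_forced_into_audit_set",
       false)
  if pvRowBool row "is_expected_buggy_function" && pvRowNB row "has_violation" then
    -- summary_row["expected_bug_detected"] = True (key is present, the default is never used)
    d1.modify key ("", false, false, false, false) (fun v => (v.1, v.2.1, v.2.2.1, v.2.2.2.1, true))
  else d1

def build_localized_bug_detection_summary (result_rows : List (List (String × String))) (generation_seed_count : Option Int) : List (String × Int) :=
  let d := result_rows.foldl pvAStep PySem.Dict.empty
  let seed_patches : PySem.Set String := PySem.Set.ofList (d.values.map (fun v => v.1))
  let summary : List (String × Int) :=
    [("localized_expected_function_found_rows", d.values.foldl (fun a v => if v.2.1 then a + 1 else a) 0),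
     ("localized_expected_function_missed_rows", d.values.foldl (fun a v => if !v.2.1 then a + 1 else a) 0),
     ("detected_bug_rows", d.values.foldl (fun a v => if v.2.2.2.2 then a + 1 else a) 0),
     ("seed_patch_count", (PySem.Set.len seed_patches : Int))]
  match generation_seed_count with
  | none => summary
  | some n => summary ++ [("generation_seed_count", n)]

-- ===== PORT B =====
-- B's single-pass loop body: state = (info : key -> (found, bug_counted), seeds, found, detected)
def pvBStep (st : PySem.Dict (String × String × String) (Bool × Bool) × PySem.Set String × Int × Int)
    (row : List (String × String)) :
    PySem.Dict (String × String × String) (Bool × Bool) × PySem.Set String × Int × Int :=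
  let key := pvRowKey row
  let info0 := st.1
  let seeds0 := st.2.1
  let found0 := st.2.2.1
  let detected0 := st.2.2.2
  let res :=
    match info0.get? key with
    | some e => (info0, seeds0, found0, e)
    | none =>
      let e : Bool × Bool := (pvRowBool row "expected_function_found", false)
      (info0.insert key e,
       PySem.Set.add seeds0 (PySem.Str.strip ((PySem.Dict.mk row).getD "seed patch" "")),
       if e.1 then found0 + 1 else found0,
       e)
  if pvRowBool row "is_expected_buggy_function" && pvRowNB row "has_violation" && !res.2.2.2.2 then
    (res.1.modify key (false, false) (fun p => (p.1, true)), res.2.1, res.2.2.1, detected0 + 1)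
  else (res.1, res.2.1, res.2.2.1, detected0)

def build_localized_bug_detection_summary_alt (result_rows : List (List (String × String))) (generation_seed_count : Option Int) : List (String × Int) :=
  let st := result_rows.foldl pvBStep (PySem.Dict.empty, PySem.Set.empty, 0, 0)
  let summary : List (String × Int) :=
    [("localized_expected_function_found_rows", st.2.2.1),
     ("localized_expected_function_missed_rows", (st.1.size : Int) - st.2.2.1),
     ("detected_bug_rows", st.2.2.2),
     ("seed_patch_count", (PySem.Set.len st.2.1 : Int))]
  match generation_seed_count with
  | none => summary
  | some n => summary ++ [("generation_seed_count", n)]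

-- ===== PRECONDITION & SPEC =====
def Spec_build_localized_bug_detection_summary (result_rows : List (List (String × String))) (generation_seed_count : Option Int) (out : List (String × Int)) : Prop := out = build_localized_bug_detection_summary_alt result_rows generation_seed_count
instance (result_rows : List (List (String × String))) (generation_seed_count : Option Int) (out : List (String × Int)) : Decidable (Spec_build_localized_bug_detection_summary result_rows generation_seed_count out) := by unfold Spec_build_localized_bug_detection_summary; infer_instance

-- ===== CLAIM (what is proved, stated in full; the proofs are below) =====
def Claim_equal_build_localized_bug_detection_summary : Prop := ∀ (result_rows : List (List (String × String))) (generation_seed_count : Option Int), Dom_build_localized_bug_detection_summary result_rows generation_seed_count → Spec_build_localized_bug_detection_summary result_rows generation_seed_count (build_localized_bug_detection_summary result_rows generation_seed_count)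

-- ===== LEMMAS AND PROOFS =====


-- ===== helper lemmas for the step proof =====
lemma pvFindMap {K V W : Type} [BEq K] (g : V → W) (L : List (K × V)) (k : K) :
    (L.map (fun p => (p.1, g p.2))).find? (fun p => p.1 == k)
      = (L.find? (fun p => p.1 == k)).map (fun p => (p.1, g p.2)) := by
  induction L with
  | nil => rfl
  | cons a t ih =>
    by_cases h : (a.1 == k) = true
    · simp [h]
    · simp only [List.map_cons, List.find?_cons, h]
      simpa [h] using ih

lemma pvReplaceNoKey {K V : Type} [BEq K] (L : List (K × V)) (k : K) (w : V)
    (h : ∀ p ∈ L, (p.1 == k) = false) :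
    L.map (fun p => if p.1 == k then (k, w) else p) = L := by
  induction L with
  | nil => rfl
  | cons a t ih =>
    simp only [List.map_cons, h a (by simp)]
    simp only [Bool.false_eq_true, if_false]
    rw [ih (fun p hp => h p (by simp [hp]))]

lemma pvFindSplit {K V : Type} [BEq K] [LawfulBEq K] (L1 L2 : List (K × V)) (k : K) (v : V)
    (h1 : ∀ p ∈ L1, (p.1 == k) = false) :
    (L1 ++ (k, v) :: L2).find? (fun p => p.1 == k) = some (k, v) := by
  rw [List.find?_append]
  have : L1.find? (fun p => p.1 == k) = none := by
    rw [List.find?_eq_none]; intro p hp; simp [h1 p hp]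
  simp [this]

lemma pvInsertSplit {K V : Type} [BEq K] [LawfulBEq K] (L1 L2 : List (K × V)) (k : K) (v w : V)
    (h1 : ∀ p ∈ L1, (p.1 == k) = false) (h2 : ∀ p ∈ L2, (p.1 == k) = false) :
    ((PySem.Dict.mk (L1 ++ (k, v) :: L2)).insert k w).items = L1 ++ (k, w) :: L2 := by
  have hc : (PySem.Dict.mk (L1 ++ (k, v) :: L2)).contains k = true := by
    simp [PySem.Dict.contains]
  simp only [PySem.Dict.insert, hc, if_true]
  simp only [List.map_append, List.map_cons]
  rw [pvReplaceNoKey L1 k w h1, pvReplaceNoKey L2 k w h2]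
  simp

lemma pvExistsSplit {K V : Type} [BEq K] [LawfulBEq K] (L : List (K × V)) (k : K) (v : V)
    (hnd : (L.map Prod.fst).Nodup)
    (h : (PySem.Dict.mk L).get? k = some v) :
    ∃ L1 L2, L = L1 ++ (k, v) :: L2 ∧ (∀ p ∈ L1, (p.1 == k) = false) ∧ (∀ p ∈ L2, (p.1 == k) = false) := by
  simp only [PySem.Dict.get?, Option.map_eq_some_iff] at h
  obtain ⟨p, hf, hp2⟩ := h
  have hpred := List.find?_some hf
  have hp1 : p.1 = k := by exact eq_of_beq hpred
  have hp : p = (k, v) := by cases p; simp_all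
  subst hp
  rw [List.find?_eq_some_iff_append] at hf
  obtain ⟨-, L1, L2, hL, hL1⟩ := hf
  refine ⟨L1, L2, hL, fun p hp => by simpa using hL1 p hp, ?_⟩
  subst hL
  simp only [List.map_append, List.map_cons] at hnd
  have hk : k ∉ L2.map Prod.fst := by
    have h2 := List.Nodup.of_append_right hnd
    exact (List.nodup_cons.mp h2).1
  intro p hp
  have hne : p.1 ≠ k := fun hpk => hk (hpk ▸ List.mem_map_of_mem hp)
  simp [hne]

-- the loop invariant relating A's dict to B's state
def pvInv (d : PySem.Dict (String × String × String) (String × Bool × Bool × Bool × Bool))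
    (st : PySem.Dict (String × String × String) (Bool × Bool) × PySem.Set String × Int × Int) : Prop :=
  (d.items.map Prod.fst).Nodup ∧
  st.1.items = d.items.map (fun p => (p.1, (p.2.2.1, p.2.2.2.2.2))) ∧
  st.2.1 = PySem.Set.ofList (d.items.map (fun p => p.2.1)) ∧
  st.2.2.1 = (d.items.countP (fun p => p.2.2.1) : Int) ∧
  st.2.2.2 = (d.items.countP (fun p => p.2.2.2.2.2) : Int)

lemma pvGetMap {K V W : Type} [BEq K] (g : V → W) (L : List (K × V)) (k : K) :
    (PySem.Dict.mk (L.map (fun p => (p.1, g p.2)))).get? k = ((PySem.Dict.mk L).get? k).map g := by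
  simp [PySem.Dict.get?, Option.map_map, pvFindMap (g := g)]
  rfl

lemma pvStep_inv (row : List (String × String)) (d) (st) (h : pvInv d st) :
    pvInv (pvAStep d row) (pvBStep st row) := by
  obtain ⟨L⟩ := d
  obtain ⟨⟨I⟩, seeds, found, det⟩ := st
  obtain ⟨hnd, hinfo, hseeds, hfound, hdet⟩ := h
  have hI : I = L.map (fun p => (p.1, (p.2.2.1, p.2.2.2.2.2))) := hinfo
  have hS : seeds = PySem.Set.ofList (L.map (fun p => p.2.1)) := hseeds
  have hF : found = (L.countP (fun p => p.2.2.1) : Int) := hfound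
  have hD : det = (L.countP (fun p => p.2.2.2.2.2) : Int) := hdet
  have hN : (L.map Prod.fst).Nodup := hnd
  subst hI hS hF hD
  unfold pvAStep pvBStep
  dsimp only
  set key := pvRowKey row with hkey
  set val0 : String × Bool × Bool × Bool × Bool :=
    (PySem.Str.strip ((PySem.Dict.mk row).getD "seed patch" ""),
     pvRowBool row "expected_function_found",
     pvRowBool row "expected_function_in_default_budget",
     pvRowBool row "expected_function_forced_into_audit_set",
     false) with hval0
  have hBget : (PySem.Dict.mk (L.map (fun p => (p.1, (p.2.2.1, p.2.2.2.2.2))))).get? key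
      = ((PySem.Dict.mk L).get? key).map (fun v => (v.2.1, v.2.2.2.2)) :=
    pvGetMap (fun v => (v.2.1, v.2.2.2.2)) L key
  cases hA : (PySem.Dict.mk L).get? key with
  | none =>
    have hfind : L.find? (fun p => p.1 == key) = none := by
      simpa [PySem.Dict.get?] using hA
    have hL1 : ∀ p ∈ L, (p.1 == key) = false := fun p hp => by
      simpa using List.find?_eq_none.mp hfind p hp
    have hcont : (PySem.Dict.mk L).contains key = false := by
      simp only [PySem.Dict.contains]
      exact List.any_eq_false.mpr (fun p hp => by simp [hL1 p hp])
    have hcontI : (PySem.Dict.mk (L.map (fun p => (p.1, (p.2.2.1, p.2.2.2.2.2))))).contains key = false := by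
      simp only [PySem.Dict.contains, List.any_map]
      exact List.any_eq_false.mpr (fun p hp => by simp [Function.comp, hL1 p hp])
    have hnotmem : key ∉ L.map Prod.fst := by
      intro hm
      obtain ⟨p, hp, hpk⟩ := List.mem_map.mp hm
      have := hL1 p hp
      simp [hpk] at this
    rw [hBget, hA]
    simp only [Option.map_none]
    have hsd : (PySem.Dict.mk L).setdefault key val0 = PySem.Dict.mk (L ++ [(key, val0)]) := by
      simp [PySem.Dict.setdefault, hcont]
    rw [hsd]
    have hgets : (PySem.Dict.mk (L ++ [(key, val0)])).get? key = some val0 := by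
      simp [PySem.Dict.get?, pvFindSplit L [] key val0 hL1]
    have hinsI : ((PySem.Dict.mk (L.map (fun p => (p.1, (p.2.2.1, p.2.2.2.2.2))))).insert key
        (pvRowBool row "expected_function_found", false)).items
        = L.map (fun p => (p.1, (p.2.2.1, p.2.2.2.2.2))) ++ [(key, (pvRowBool row "expected_function_found", false))] := by
      simp [PySem.Dict.insert, hcontI]
    by_cases hc : (pvRowBool row "is_expected_buggy_function" && pvRowNB row "has_violation") = true
    · -- bug condition fires on the fresh key
      rw [hc]
      simp only [if_true, Bool.not_false, Bool.and_true]
      have hmod : ((PySem.Dict.mk (L ++ [(key, val0)])).modify key ("", false, false, false, false)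
          (fun v => (v.1, v.2.1, v.2.2.1, v.2.2.2.1, true))).items
          = L ++ [(key, (val0.1, val0.2.1, val0.2.2.1, val0.2.2.2.1, true))] := by
        simp only [PySem.Dict.modify, PySem.Dict.getD, hgets, Option.getD_some]
        exact pvInsertSplit L [] key val0 _ hL1 (by simp)
      have hL1map : ∀ p ∈ L.map (fun p => (p.1, (p.2.2.1, p.2.2.2.2.2))), (p.1 == key) = false := by
        intro p hp
        obtain ⟨q, hq, rfl⟩ := List.mem_map.mp hp
        exact hL1 q hq
      have hstep : (PySem.Dict.mk (L.map (fun p => (p.1, (p.2.2.1, p.2.2.2.2.2))))).insert key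
          (pvRowBool row "expected_function_found", false)
          = PySem.Dict.mk (L.map (fun p => (p.1, (p.2.2.1, p.2.2.2.2.2))) ++ [(key, (pvRowBool row "expected_function_found", false))]) := by
        simp [PySem.Dict.insert, hcontI]
      have hgetsI : (PySem.Dict.mk (L.map (fun p => (p.1, (p.2.2.1, p.2.2.2.2.2))) ++ [(key, (pvRowBool row "expected_function_found", false))])).get? key
          = some (pvRowBool row "expected_function_found", false) := by
        simp [PySem.Dict.get?, pvFindSplit _ [] key _ hL1map]
      have hmodI : ((PySem.Dict.mk (L.map (fun p => (p.1, (p.2.2.1, p.2.2.2.2.2))) ++ [(key, (pvRowBool row "expected_function_found", false))])).modify key (false, false) (fun p => (p.1, true))).items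
          = L.map (fun p => (p.1, (p.2.2.1, p.2.2.2.2.2))) ++ [(key, (pvRowBool row "expected_function_found", true))] := by
        simp only [PySem.Dict.modify, PySem.Dict.getD, hgetsI, Option.getD_some]
        exact pvInsertSplit _ [] key _ _ hL1map (by simp)
      refine ⟨?_, ?_, ?_, ?_, ?_⟩
      · dsimp only
        rw [hmod]
        simpa using List.Nodup.append hN (by simp) (by simpa [List.disjoint_singleton] using hnotmem)
      · dsimp only
        rw [hstep, hmodI, hmod]
        simp [hval0]
      · dsimp only
        rw [hmod]
        simp only [List.map_append, List.map_cons, List.map_nil]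
        simp [PySem.Set.ofList, List.foldl_append, hval0]
      · dsimp only
        rw [hmod]
        simp [List.countP_append, hval0]
        split_ifs <;> simp
      · dsimp only
        rw [hmod]
        simp [List.countP_append, hval0]
    · -- bug condition does not fire on the fresh key
      have hcf : (pvRowBool row "is_expected_buggy_function" && pvRowNB row "has_violation") = false :=
        Bool.not_eq_true _ ▸ Bool.eq_false_iff.mpr hc
      rw [hcf]
      simp only [Bool.and_true, Bool.not_false, if_neg (by simp : ¬((false : Bool) = true))]
      have hstep : (PySem.Dict.mk (L.map (fun p => (p.1, (p.2.2.1, p.2.2.2.2.2))))).insert key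
          (pvRowBool row "expected_function_found", false)
          = PySem.Dict.mk (L.map (fun p => (p.1, (p.2.2.1, p.2.2.2.2.2))) ++ [(key, (pvRowBool row "expected_function_found", false))]) := by
        simp [PySem.Dict.insert, hcontI]
      refine ⟨?_, ?_, ?_, ?_, ?_⟩
      · dsimp only
        simpa using List.Nodup.append hN (by simp) (by simpa [List.disjoint_singleton] using hnotmem)
      · dsimp only
        rw [hstep]
        simp [hval0]
      · dsimp only
        simp only [List.map_append, List.map_cons, List.map_nil]
        simp [PySem.Set.ofList, List.foldl_append, hval0]
      · dsimp only
        simp [List.countP_append, hval0]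
        split_ifs <;> simp
      · dsimp only
        simp [List.countP_append, hval0]
  | some v =>
    obtain ⟨L1, L2, hL, h1, h2⟩ := pvExistsSplit L key v hN hA
    obtain ⟨v1, v2, v3, v4, v5⟩ := v
    subst hL
    have hcont : (PySem.Dict.mk (L1 ++ (key, (v1, v2, v3, v4, v5)) :: L2)).contains key = true := by
      simp [PySem.Dict.contains]
    have hsd : (PySem.Dict.mk (L1 ++ (key, (v1, v2, v3, v4, v5)) :: L2)).setdefault key val0
        = PySem.Dict.mk (L1 ++ (key, (v1, v2, v3, v4, v5)) :: L2) := by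
      simp [PySem.Dict.setdefault, hcont]
    have hget : (PySem.Dict.mk (L1 ++ (key, (v1, v2, v3, v4, v5)) :: L2)).get? key = some (v1, v2, v3, v4, v5) := by
      simp [PySem.Dict.get?, pvFindSplit L1 L2 key _ h1]
    rw [hBget, hA]
    dsimp only [Option.map_some]
    rw [hsd]
    by_cases hc : (pvRowBool row "is_expected_buggy_function" && pvRowNB row "has_violation") = true
    · rw [hc]
      have hmod : ((PySem.Dict.mk (L1 ++ (key, (v1, v2, v3, v4, v5)) :: L2)).modify key ("", false, false, false, false)
          (fun v => (v.1, v.2.1, v.2.2.1, v.2.2.2.1, true))).items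
          = L1 ++ (key, (v1, v2, v3, v4, true)) :: L2 := by
        simp only [PySem.Dict.modify, PySem.Dict.getD, hget, Option.getD_some]
        exact pvInsertSplit L1 L2 key _ _ h1 h2
      by_cases hb : v5 = true
      · subst hb
        simp only [Bool.not_true, Bool.and_false, if_neg (by simp : ¬((false : Bool) = true))]
        refine ⟨?_, ?_, ?_, ?_, ?_⟩ <;> dsimp only <;> simp only [if_pos trivial] <;> rw [hmod]
        exact hN
      · have hb5 : v5 = false := by simpa using hb
        subst hb5
        simp only [Bool.not_false, Bool.and_true]
        have hmapL : (L1 ++ (key, (v1, v2, v3, v4, false)) :: L2).map (fun p => (p.1, (p.2.2.1, p.2.2.2.2.2)))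
            = L1.map (fun p => (p.1, (p.2.2.1, p.2.2.2.2.2))) ++ (key, (v2, false)) :: L2.map (fun p => (p.1, (p.2.2.1, p.2.2.2.2.2))) := by
          simp
        have hL1map : ∀ p ∈ L1.map (fun p => (p.1, (p.2.2.1, p.2.2.2.2.2))), (p.1 == key) = false := by
          intro p hp
          obtain ⟨q, hq, rfl⟩ := List.mem_map.mp hp
          exact h1 q hq
        have hL2map : ∀ p ∈ L2.map (fun p => (p.1, (p.2.2.1, p.2.2.2.2.2))), (p.1 == key) = false := by
          intro p hp
          obtain ⟨q, hq, rfl⟩ := List.mem_map.mp hp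
          exact h2 q hq
        have hgetI : (PySem.Dict.mk (L1.map (fun p => (p.1, (p.2.2.1, p.2.2.2.2.2))) ++ (key, (v2, false)) :: L2.map (fun p => (p.1, (p.2.2.1, p.2.2.2.2.2))))).get? key = some (v2, false) := by
          simp [PySem.Dict.get?, pvFindSplit _ _ key _ hL1map]
        have hmodI : ((PySem.Dict.mk ((L1 ++ (key, (v1, v2, v3, v4, false)) :: L2).map (fun p => (p.1, (p.2.2.1, p.2.2.2.2.2))))).modify key (false, false) (fun p => (p.1, true))).items
            = L1.map (fun p => (p.1, (p.2.2.1, p.2.2.2.2.2))) ++ (key, (v2, true)) :: L2.map (fun p => (p.1, (p.2.2.1, p.2.2.2.2.2))) := by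
          simp only [PySem.Dict.modify, PySem.Dict.getD, hmapL, hgetI, Option.getD_some]
          exact pvInsertSplit _ _ key _ _ hL1map hL2map
        refine ⟨?_, ?_, ?_, ?_, ?_⟩
        · dsimp only
          simp only [if_pos trivial]
          rw [hmod]
          simpa using hN
        · dsimp only
          simp only [if_pos trivial]
          rw [hmodI, hmod]
          simp
        · dsimp only
          simp only [if_pos trivial]
          rw [hmod]
          simp
        · dsimp only
          simp only [if_pos trivial]
          rw [hmod]
          simp [List.countP_append, List.countP_cons]
        · dsimp only
          simp only [if_pos trivial]
          rw [hmod]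
          simp [List.countP_append]
          ring
    · have hcf : (pvRowBool row "is_expected_buggy_function" && pvRowNB row "has_violation") = false :=
        Bool.not_eq_true _ ▸ Bool.eq_false_iff.mpr hc
      rw [hcf]
      simp only [Bool.false_and, if_neg (by simp : ¬((false : Bool) = true))]
      exact ⟨hN, rfl, rfl, rfl, rfl⟩

lemma pvInv_foldl (rows : List (List (String × String))) :
    ∀ d st, pvInv d st → pvInv (rows.foldl pvAStep d) (rows.foldl pvBStep st) := by
  induction rows with
  | nil => intro d st h; exact h
  | cons r rs ih => intro d st h; exact ih _ _ (pvStep_inv r d st h)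

-- ===== VERDICT (by name: the statement is the Claim_ definition above) =====
lemma pvCountNot {α : Type} (l : List α) (p : α → Bool) :
    l.countP (fun a => !p a) = l.length - l.countP p := by
  have h := List.length_eq_countP_add_countP (p := p) (l := l)
  have h2 : l.countP (fun a => decide ¬(p a = true)) = l.countP (fun a => !p a) :=
    List.countP_congr (fun a _ => by by_cases hp : p a <;> simp [hp])
  omega

theorem build_localized_bug_detection_summary_spec : Claim_equal_build_localized_bug_detection_summary := by
  unfold Claim_equal_build_localized_bug_detection_summary
  intro rows gsc _
  unfold Spec_build_localized_bug_detection_summary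
  unfold build_localized_bug_detection_summary build_localized_bug_detection_summary_alt
  obtain ⟨hnd, hI, hS, hF, hD⟩ :=
    pvInv_foldl rows PySem.Dict.empty (PySem.Dict.empty, PySem.Set.empty, 0, 0)
      ⟨by simp [PySem.Dict.empty], rfl, rfl, rfl, rfl⟩
  dsimp only
  set d := rows.foldl pvAStep PySem.Dict.empty with hd
  set st := rows.foldl pvBStep (PySem.Dict.empty, PySem.Set.empty, 0, 0) with hst
  have hlen : st.1.size = d.size := by
    simp only [PySem.Dict.size, hI, List.length_map]
  have h1 : d.values.foldl (fun a v => if v.2.1 then a + 1 else a) 0 = st.2.2.1 := by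
    rw [PySem.List.foldl_count_if (fun v => v.2.1) d.values 0, hF]
    simp only [PySem.Dict.values, List.countP_map, zero_add]
    rfl
  have h3 : d.values.foldl (fun a v => if v.2.2.2.2 then a + 1 else a) 0 = st.2.2.2 := by
    rw [PySem.List.foldl_count_if (fun v => v.2.2.2.2) d.values 0, hD]
    simp only [PySem.Dict.values, List.countP_map, zero_add]
    rfl
  have h2 : d.values.foldl (fun a v => if !v.2.1 then a + 1 else a) 0 = (st.1.size : Int) - st.2.2.1 := by
    rw [PySem.List.foldl_count_if (fun v => !v.2.1) d.values 0, hF, hlen]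
    simp only [PySem.Dict.values, PySem.Dict.size, List.countP_map]
    have e1 : List.countP ((fun v => !v.2.1) ∘ fun x => x.2) d.items
        = List.countP (fun p => !p.2.2.1) d.items := rfl
    have hcn := pvCountNot d.items (fun p => p.2.2.1)
    have hle : d.items.countP (fun p => p.2.2.1) ≤ d.items.length := List.countP_le_length
    rw [e1, hcn]
    omega
  have h4 : PySem.Set.ofList (d.values.map (fun v => v.1)) = st.2.1 := by
    rw [hS]
    simp only [PySem.Dict.values, List.map_map]
    rfl
  rw [h1, h2, h3, h4]
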